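-- pv_equiv track=rewrite | github.com/Angelido/lossless-compression-using-LLMs | Code/OldFiles/utilityOld.py | sort_rank_lists_by_length
-- ===== SOURCE A (Python) =====
-- from typing import List, Tuple, Dict
--
-- def sort_rank_lists_by_length(
--     rank_lists: List[List[int]]
-- ) -> Tuple[List[List[int]], Dict[int, int]]:
--     """
--     Sorts a collection of rank lists by sequence length (descending order),
--     while preserving a mapping to the original indices.
--
--     Input:
--     - rank_lists (List[List[int]]): A list of rank lists, one per input sequence.
--
--     Return:
--     - sorted_lists (List[List[int]]): The rank lists sorted by decreasing length.
--     - index_map (Dict[int, int]): A mapping from the new index to the original index.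
--     """
--     # Build metadata tuples: (length, original_index, list)
--     meta = [(len(lst), idx, lst) for idx, lst in enumerate(rank_lists)]
--
--     # Sort by length in descending order
--     meta_sorted = sorted(meta, key=lambda x: x[0], reverse=True)
--     # Extract sorted lists and create mapping new_idx -> original_idx
--     sorted_lists = [item[2] for item in meta_sorted]
--     index_map = {new_idx: orig_idx for new_idx, (_, orig_idx, _) in enumerate(meta_sorted)}
--
--     return sorted_lists, index_map
-- ===== SOURCE B (Python) =====
-- def sort_rank_lists_by_length(rank_lists):
--     # Group by length into buckets (insertion order preserves original order),
--     # then emit buckets in descending length order.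
--     buckets = {}
--     for idx, lst in enumerate(rank_lists):
--         buckets.setdefault(len(lst), []).append((idx, lst))
--     sorted_lists = []
--     index_map = {}
--     new_idx = 0
--     for length in sorted(buckets, reverse=True):
--         for orig_idx, lst in buckets[length]:
--             sorted_lists.append(lst)
--             index_map[new_idx] = orig_idx
--             new_idx += 1
--     return sorted_lists, index_map
-- ===== Notes on version B (the rewrite author's own statement) =====
-- stated objective: alternative
-- what changed: Replaces the build-tuples/stable-reverse-sort/extract pipeline by a single grouping pass into length-keyed buckets that are then emitted in descending key order (sorting only the distinct lengths, not the lists).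
import Mathlib
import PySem

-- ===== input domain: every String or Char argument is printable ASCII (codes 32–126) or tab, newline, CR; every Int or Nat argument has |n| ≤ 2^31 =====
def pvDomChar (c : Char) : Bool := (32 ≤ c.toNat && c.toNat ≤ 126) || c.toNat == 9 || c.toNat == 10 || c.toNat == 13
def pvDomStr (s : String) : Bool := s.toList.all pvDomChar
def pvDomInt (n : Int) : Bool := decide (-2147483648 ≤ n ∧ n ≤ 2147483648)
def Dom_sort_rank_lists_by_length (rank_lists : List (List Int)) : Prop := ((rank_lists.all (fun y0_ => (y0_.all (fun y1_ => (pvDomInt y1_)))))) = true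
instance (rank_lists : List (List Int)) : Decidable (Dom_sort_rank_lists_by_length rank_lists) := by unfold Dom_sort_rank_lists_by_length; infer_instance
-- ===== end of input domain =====

-- B groups the lists once into length-keyed buckets and emits them in descending
-- length order (sorting only the distinct lengths), instead of A's stable reverse
-- sort of (length, index, list) tuples; same return value, alternative algorithm.

-- ===== PORT A =====
def sort_rank_lists_by_length (rank_lists : List (List Int)) : List (List Int) × (List (Int × Int)) :=
  let meta0 := (PySem.List.enumerate rank_lists).map (fun p => ((p.2.length : Int), p.1, p.2))
  let meta_sorted := PySem.List.sorted meta0 (fun x => x.1) true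
  let sorted_lists := meta_sorted.map (fun item => item.2.2)
  -- dict comprehension {new_idx: orig_idx for ...}: insertion-ordered dict, returned as its items
  let index_map := ((PySem.List.enumerate meta_sorted).foldl
      (fun d q => d.insert q.1 q.2.2.1) (PySem.Dict.empty : PySem.Dict Int Int)).items
  (sorted_lists, index_map)

-- ===== PORT B =====
def sort_rank_lists_by_length_alt (rank_lists : List (List Int)) : List (List Int) × (List (Int × Int)) :=
  -- buckets.setdefault(len(lst), []).append((idx, lst))
  let buckets := (PySem.List.enumerate rank_lists).foldl
      (fun d p => d.modify (p.2.length : Int) [] (fun b => b ++ [p]))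
      (PySem.Dict.empty : PySem.Dict Int (List (Int × List Int)))
  -- for length in sorted(buckets, reverse=True): walk the bucket, appending
  let st := (PySem.List.sorted buckets.keys (fun k => k) true).foldl
      (fun st k => (buckets.getD k []).foldl
        (fun st p => (st.1 ++ [p.2], st.2.1.insert st.2.2 p.1, st.2.2 + 1)) st)
      (([] : List (List Int)), (PySem.Dict.empty : PySem.Dict Int Int), (0 : Int))
  (st.1, st.2.1.items)

-- ===== PRECONDITION & SPEC =====
def Spec_sort_rank_lists_by_length (rank_lists : List (List Int)) (out : List (List Int) × (List (Int × Int))) : Prop := out = sort_rank_lists_by_length_alt rank_lists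
instance (rank_lists : List (List Int)) (out : List (List Int) × (List (Int × Int))) : Decidable (Spec_sort_rank_lists_by_length rank_lists out) := by unfold Spec_sort_rank_lists_by_length; infer_instance

-- ===== CLAIM (what is proved, stated in full; the proofs are below) =====
def Claim_equal_sort_rank_lists_by_length : Prop := ∀ (rank_lists : List (List Int)), Dom_sort_rank_lists_by_length rank_lists → Spec_sort_rank_lists_by_length rank_lists (sort_rank_lists_by_length rank_lists)

-- ===== LEMMAS AND PROOFS =====

-- insertBy walks past a block it does not insert into
theorem insertBy_append_not {α : Type} (before : α → α → Bool) (x : α) (ys zs : List α)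
    (h : ∀ y ∈ ys, before x y = false) :
    PySem.List.insertBy before x (ys ++ zs) = ys ++ PySem.List.insertBy before x zs := by
  induction ys with
  | nil => simp
  | cons y ys ih =>
    simp only [List.cons_append, PySem.List.insertBy, h y (by simp)]
    simp only [Bool.false_eq_true, if_false, List.cons.injEq, true_and]
    exact ih (fun y hy => h y (by simp [hy]))

theorem insertBy_all_before {α : Type} (before : α → α → Bool) (x : α) (zs : List α)
    (h : ∀ y ∈ zs, before x y = true) :
    PySem.List.insertBy before x zs = x :: zs := by
  cases zs with
  | nil => rfl
  | cons z zs => simp [PySem.List.insertBy, h z (by simp)]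

-- a strictly decreasing list splits at any pivot into its >-part, the pivot (if present), and its <-part
theorem desc_split (K : List Int) (h : K.Pairwise (fun a b => b < a)) (k0 : Int) :
    K = K.filter (fun k => decide (k0 < k))
        ++ (if k0 ∈ K then [k0] else [])
        ++ K.filter (fun k => decide (k < k0)) := by
  induction K with
  | nil => simp
  | cons k K ih =>
    have hall : ∀ b ∈ K, b < k := by
      intro b hb; exact (List.pairwise_cons.mp h).1 b hb
    have hK := (List.pairwise_cons.mp h).2
    rcases lt_trichotomy k0 k with hlt | heq | hgt
    · have hne : k0 ≠ k := ne_of_lt hlt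
      have hmem : (k0 ∈ k :: K) = (k0 ∈ K) := by simp [List.mem_cons, hne]
      have h2 : (fun k => decide (k < k0)) k = false := by simp; omega
      simp only [List.filter_cons, hmem]
      simp only [decide_eq_true_eq, hlt, if_true, h2]
      simp only [Bool.false_eq_true, if_false, List.cons_append]
      conv_lhs => rw [ih hK]
    · subst heq
      have h1 : K.filter (fun k => decide (k0 < k)) = [] := by
        rw [List.filter_eq_nil_iff]; intro a ha; simp; exact (hall a ha).le
      have h2 : K.filter (fun k => decide (k < k0)) = K := by
        rw [List.filter_eq_self]; intro a ha; simp [hall a ha]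
      simp [List.filter_cons, h1, h2]
    · have h1 : (k :: K).filter (fun k => decide (k0 < k)) = [] := by
        rw [List.filter_eq_nil_iff]; intro a ha
        rcases List.mem_cons.mp ha with rfl | ha' <;> simp
        · omega
        · have := hall a ha'; omega
      have h2 : (k :: K).filter (fun k => decide (k < k0)) = k :: K := by
        rw [List.filter_eq_self]; intro a ha
        rcases List.mem_cons.mp ha with rfl | ha' <;> simp
        · omega
        · have := hall a ha'; omega
      have h3 : k0 ∉ k :: K := by
        intro hc; rcases List.mem_cons.mp hc with rfl | hc'
        · omega
        · have := hall _ hc'; omega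
      simp [h1, h2, h3]

-- the distinct-keys list, sorted descending, is strictly decreasing
theorem sortedKeys_pairwise (ks : List Int) :
    (PySem.List.sorted (PySem.Set.ofList ks) (fun k => k) true).Pairwise (fun a b => b < a) := by
  have hperm := PySem.List.sorted_perm (PySem.Set.ofList ks) (fun k : Int => k) true
  have hnd : (PySem.List.sorted (PySem.Set.ofList ks) (fun k : Int => k) true).Nodup :=
    hperm.nodup_iff.mpr (PySem.Set.nodup_ofList ks)
  have hle := PySem.List.sorted_pairwise_rev (PySem.Set.ofList ks) (fun k : Int => k)
  exact (hle.and hnd).imp (fun {a b} hab => lt_of_le_of_ne hab.1 (Ne.symm hab.2))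

-- inserting x into bucketed segments: it lands right after its own bucket
theorem insertBy_flatMap_split {α : Type} (key : α → Int) (x : α) (F1 mid F2 : List Int)
    (h1 : ∀ k ∈ F1, key x < k) (hmid : ∀ k ∈ mid, k = key x) (h2 : ∀ k ∈ F2, k < key x)
    (B : Int → List α) (hB : ∀ k, ∀ y ∈ B k, key y = k) :
    PySem.List.insertBy (fun a b => decide (key b < key a)) x ((F1 ++ mid ++ F2).flatMap B)
      = F1.flatMap B ++ mid.flatMap B ++ x :: F2.flatMap B := by
  rw [List.flatMap_append, List.flatMap_append]
  rw [List.append_assoc, insertBy_append_not _ _ _ _ ?hF1, insertBy_append_not _ _ _ _ ?hmid,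
    insertBy_all_before _ _ _ ?hF2, List.append_assoc]
  case hF1 =>
    intro y hy
    obtain ⟨k, hk, hyk⟩ := List.mem_flatMap.mp hy
    have := hB k y hyk; have := h1 k hk; simp; omega
  case hmid =>
    intro y hy
    obtain ⟨k, hk, hyk⟩ := List.mem_flatMap.mp hy
    have := hB k y hyk; have := hmid k hk; simp; omega
  case hF2 =>
    intro y hy
    obtain ⟨k, hk, hyk⟩ := List.mem_flatMap.mp hy
    have := hB k y hyk; have := h2 k hk; simp; omega

-- MAIN LEMMA: a stable descending sort is the concatenation of the equal-key
-- buckets (in original order) taken in descending key order.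
theorem sorted_rev_eq_flatMap_buckets {α : Type} (l : List α) (key : α → Int) :
    PySem.List.sorted l key true
      = (PySem.List.sorted (PySem.Set.ofList (l.map key)) (fun k => k) true).flatMap
          (fun k => l.filter (fun x => key x == k)) := by
  induction l using List.reverseRecOn with
  | nil => simp [PySem.List.sorted]
  | append_singleton l x ih =>
    have hstep : PySem.List.sorted (l ++ [x]) key true
        = PySem.List.insertBy (fun a b => decide (key b < key a)) x
            (PySem.List.sorted l key true) := by
      rw [PySem.List.sorted_rev_eq_foldl_insertBy l key,
        PySem.List.sorted_rev_eq_foldl_insertBy (l ++ [x]) key, List.foldl_append]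
      rfl
    rw [hstep, ih]
    have hKpw := sortedKeys_pairwise (l.map key)
    set K := PySem.List.sorted (PySem.Set.ofList (l.map key)) (fun k : Int => k) true with hKdef
    set F1 := K.filter (fun k => decide (key x < k)) with hF1def
    set F2 := K.filter (fun k => decide (k < key x)) with hF2def
    have hsplit := desc_split K hKpw (key x)
    have hF1 : ∀ k ∈ F1, key x < k := by
      intro k hk; rw [hF1def] at hk; simpa using List.of_mem_filter hk
    have hF2 : ∀ k ∈ F2, k < key x := by
      intro k hk; rw [hF2def] at hk; simpa using List.of_mem_filter hk
    have hB : ∀ k : Int, ∀ y ∈ l.filter (fun z => key z == k), key y = k := by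
      intro k y hy; simpa using List.of_mem_filter hy
    have hbnew : ∀ k : Int, (l ++ [x]).filter (fun z => key z == k)
        = l.filter (fun z => key z == k) ++ (if (key x == k) = true then [x] else []) := by
      intro k; rw [List.filter_append, List.filter_singleton, Bool.cond_eq_if]
    have hbne : ∀ k : Int, k ≠ key x → (l ++ [x]).filter (fun z => key z == k)
        = l.filter (fun z => key z == k) := by
      intro k hk; rw [hbnew, if_neg (by simp [Ne.symm hk])]; simp
    have hmemK : key x ∈ K ↔ key x ∈ l.map key := by
      rw [hKdef, PySem.List.mem_sorted, PySem.Set.mem_ofList]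
    have hmapx : (l ++ [x]).map key = l.map key ++ [key x] := by simp
    by_cases hx : key x ∈ l.map key
    · -- the length already occurs: key set unchanged, x appended to its bucket
      have hof : PySem.Set.ofList ((l ++ [x]).map key) = PySem.Set.ofList (l.map key) := by
        rw [hmapx, PySem.Set.ofList_append_singleton,
          PySem.Set.add_of_mem ((PySem.Set.mem_ofList _ _).mpr hx)]
      rw [if_pos (hmemK.mpr hx)] at hsplit
      rw [hof, ← hKdef]
      conv_lhs => rw [hsplit]
      conv_rhs => rw [hsplit]
      rw [insertBy_flatMap_split key x F1 [key x] F2 hF1 (by simp) hF2 _ hB,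
        List.flatMap_append, List.flatMap_append,
        List.flatMap_congr (fun k hk => hbne k (ne_of_gt (hF1 k hk))),
        List.flatMap_congr (fun k hk => hbne k (ne_of_lt (hF2 k hk)))]
      simp [hbnew]
    · -- a fresh length: its singleton bucket [x] is spliced between F1 and F2
      have hof : PySem.Set.ofList ((l ++ [x]).map key)
          = PySem.Set.ofList (l.map key) ++ [key x] := by
        rw [hmapx, PySem.Set.ofList_append_singleton,
          PySem.Set.add_of_not_mem (by rw [PySem.Set.mem_ofList]; exact hx)]
      rw [if_neg (fun hc => hx (hmemK.mp hc))] at hsplit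
      simp only [List.append_nil] at hsplit
      have hKperm : K.Perm (PySem.Set.ofList (l.map key)) :=
        PySem.List.sorted_perm _ _ _
      have hp1 : (key x :: F2).Perm (F2 ++ [key x]) :=
        (List.perm_append_singleton (key x) F2).symm
      have hp2 : (F1 ++ (F2 ++ [key x])).Perm (PySem.Set.ofList (l.map key) ++ [key x]) := by
        rw [← List.append_assoc]
        exact List.Perm.append_right [key x] (hsplit ▸ hKperm)
      have hperm : (F1 ++ key x :: F2).Perm (PySem.Set.ofList (l.map key) ++ [key x]) :=
        (hp1.append_left F1).trans hp2
      have hpw : (F1 ++ key x :: F2).Pairwise (fun a b => b < a) := by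
        rw [List.pairwise_append]
        refine ⟨List.Pairwise.sublist List.filter_sublist hKpw, ?_, ?_⟩
        · rw [List.pairwise_cons]
          exact ⟨hF2, List.Pairwise.sublist List.filter_sublist hKpw⟩
        · intro a ha b hb
          rcases List.mem_cons.mp hb with rfl | hb'
          · exact hF1 a ha
          · exact lt_trans (hF2 b hb') (hF1 a ha)
      have hKnew : PySem.List.sorted (PySem.Set.ofList (l.map key) ++ [key x])
          (fun k : Int => k) true = F1 ++ key x :: F2 :=
        PySem.List.sorted_rev_eq_of_perm_of_pairwise_gt _ _ _ hperm hpw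
      rw [hof, hKnew]
      conv_lhs => rw [hsplit]
      have hempty : l.filter (fun z => key z == key x) = [] := by
        rw [List.filter_eq_nil_iff]
        intro a ha hc
        exact hx (List.mem_map.mpr ⟨a, ha, by simpa using hc⟩)
      rw [show (F1 ++ F2 : List Int) = F1 ++ [] ++ F2 by simp,
        insertBy_flatMap_split key x F1 [] F2 hF1 (by simp) hF2 _ hB,
        show (key x :: F2 : List Int) = [key x] ++ F2 from rfl,
        List.flatMap_append, List.flatMap_append,
        List.flatMap_congr (fun k hk => hbne k (ne_of_gt (hF1 k hk))),
        List.flatMap_congr (fun k hk => hbne k (ne_of_lt (hF2 k hk)))]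
      simp [hbnew, hempty]

theorem enumerate_map {α β : Type} (f : α → β) (xs : List α) (s : Int) :
    PySem.List.enumerate (xs.map f) s
      = (PySem.List.enumerate xs s).map (fun q => (q.1, f q.2)) := by
  induction xs generalizing s with
  | nil => simp [PySem.List.enumerate_nil]
  | cons x xs ih => simp [PySem.List.enumerate_cons, ih]

theorem nodup_fst_enumerate {α : Type} (xs : List α) (s : Int) :
    ((PySem.List.enumerate xs s).map (fun q => q.1)).Nodup :=
  (List.pairwise_map.mpr (PySem.List.pairwise_lt_enumerate xs s)).imp ne_of_lt

-- B's inner loop over one (or, flattened, all) bucket(s), characterised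
theorem bfold_eq (M : List (Int × List Int)) (sl : List (List Int))
    (d : PySem.Dict Int Int) (n : Int) :
    M.foldl (fun st p => (st.1 ++ [p.2], st.2.1.insert st.2.2 p.1, st.2.2 + 1)) (sl, d, n)
      = (sl ++ M.map (fun p => p.2),
         (PySem.List.enumerate M n).foldl (fun d q => d.insert q.1 q.2.1) d,
         n + M.length) := by
  induction M generalizing sl d n with
  | nil => simp [PySem.List.enumerate_nil]
  | cons p M ih =>
    simp only [List.foldl_cons, PySem.List.enumerate_cons, ih, List.map_cons, List.length_cons]
    refine congrArg₂ _ (by simp) (congrArg₂ _ rfl ?_)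
    omega

-- proof-side abbreviations: the shared bucket decomposition both ports reduce to
def pvKey (p : Int × List Int) : Int := (p.2.length : Int)

def pvF (p : Int × List Int) : Int × Int × List Int := (pvKey p, p.1, p.2)

def pvK (rl : List (List Int)) : List Int :=
  PySem.List.sorted (PySem.Set.ofList ((PySem.List.enumerate rl).map pvKey)) (fun k => k) true

def pvM (rl : List (List Int)) : List (Int × List Int) :=
  (pvK rl).flatMap (fun k => (PySem.List.enumerate rl).filter (fun p => pvKey p == k))

-- the bucket dictionary's lookups are the filters
theorem getD_bucket (l : List (Int × List Int)) (d : PySem.Dict Int (List (Int × List Int)))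
    (k : Int) :
    (l.foldl (fun d p => d.modify (p.2.length : Int) [] (fun b => b ++ [p])) d).getD k []
      = d.getD k [] ++ l.filter (fun p => ((p.2.length : Int)) == k) := by
  induction l generalizing d with
  | nil => simp
  | cons p l ih =>
    rw [List.foldl_cons, ih, List.filter_cons]
    by_cases h : k = (p.2.length : Int)
    · rw [PySem.Dict.getD_modify, if_pos h]
      simp [h]
    · rw [PySem.Dict.getD_modify, if_neg h]
      simp [Ne.symm h]

-- A's port computes the bucket decomposition
theorem a_char (rl : List (List Int)) :
    sort_rank_lists_by_length rl
      = ((pvM rl).map (fun p => p.2),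
         (PySem.List.enumerate (pvM rl)).map (fun q => (q.1, q.2.1))) := by
  simp only [sort_rank_lists_by_length]
  rw [show (fun p : Int × List Int => ((p.2.length : Int), p.1, p.2)) = pvF from rfl]
  have hms : PySem.List.sorted ((PySem.List.enumerate rl).map pvF)
      (fun x => x.1) true = (pvM rl).map pvF := by
    rw [sorted_rev_eq_flatMap_buckets, List.map_map]
    rw [show ((fun (x : Int × Int × List Int) => x.1) ∘ pvF) = pvKey from rfl]
    rw [pvM, List.map_flatMap]
    refine List.flatMap_congr ?_
    intro k _
    rw [List.filter_map]
    rfl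
  rw [hms]
  have hitems := PySem.Dict.items_foldl_insert_fresh
      (PySem.List.enumerate ((pvM rl).map pvF)) (fun q => q.1) (fun q => q.2.2.1)
      (PySem.Dict.empty : PySem.Dict Int Int)
      (fun a _ => rfl) (nodup_fst_enumerate _ _)
  rw [hitems]
  rw [enumerate_map, List.map_map, List.map_map]
  rfl

-- B's port computes the same decomposition
theorem b_char (rl : List (List Int)) :
    sort_rank_lists_by_length_alt rl
      = ((pvM rl).map (fun p => p.2),
         (PySem.List.enumerate (pvM rl)).map (fun q => (q.1, q.2.1))) := by
  simp only [sort_rank_lists_by_length_alt]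
  have hkeys := PySem.Dict.keys_foldl_modify_key (PySem.List.enumerate rl)
      (fun p : Int × List Int => (p.2.length : Int)) ([] : List (Int × List Int))
      (fun _ p => fun b => b ++ [p])
      (PySem.Dict.empty : PySem.Dict Int (List (Int × List Int)))
  rw [hkeys, PySem.Dict.keys_empty, PySem.Set.update_nil_left]
  rw [show (fun p : Int × List Int => (p.2.length : Int)) = pvKey from rfl, ← pvK]
  rw [← List.foldl_flatMap]
  have hfm : (pvK rl).flatMap
      (fun k => ((PySem.List.enumerate rl).foldl
        (fun d p => d.modify (p.2.length : Int) [] (fun b => b ++ [p]))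
        (PySem.Dict.empty : PySem.Dict Int (List (Int × List Int)))).getD k [])
      = pvM rl := by
    rw [pvM]
    refine List.flatMap_congr ?_
    intro k _
    rw [getD_bucket]
    rfl
  rw [hfm, bfold_eq]
  have hitems := PySem.Dict.items_foldl_insert_fresh
      (PySem.List.enumerate (pvM rl)) (fun q => q.1) (fun q => q.2.1)
      (PySem.Dict.empty : PySem.Dict Int Int)
      (fun a _ => rfl) (nodup_fst_enumerate _ _)
  rw [hitems]
  rfl

-- ===== VERDICT (by name: the statement is the Claim_ definition above) =====
theorem sort_rank_lists_by_length_spec : Claim_equal_sort_rank_lists_by_length := by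
  intro rl _
  unfold Spec_sort_rank_lists_by_length
  rw [a_char, b_char]
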